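-- pv_equiv track=rewrite | github.com/Syncline-blip/code-challenge | sampler.py | closest_word
-- ===== SOURCE A (Python) =====
-- def lcs(first_string, second_string, x,y):
--     if x == 0 or y == 0:
--         return 0
--     elif first_string[x-1] == second_string[y-1]:
--         return 1 + lcs(first_string, second_string, x-1, y-1)
--     else:
--         return (max(lcs(first_string, second_string, x, y-1), lcs(first_string,second_string, x-1, y)))
--
-- def closest_word(word: str, possibilities: list[str]):
--     """
--     >>> closest_word('potato', ['potato', 'pumpkin'])
--     'potato'
--     >>> closest_word('arakeat', ['zzzzzzzz', 'parakeet'])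
--     'parakeet'
--     >>> closest_word('parakeet', ['zzzzzzzz', 'arakis'])
--     'arakis'
--     """
--     try:
--
--         close_word = ""
--         lcs_length = -1
--
--         for closest in possibilities:
--             temp_length = lcs(word, closest, len(word), len(closest))
--             if temp_length > lcs_length:
--                 lcs_length = temp_length
--                 close_word = closest
--         return close_word
--     except:
--
--         raise NotImplementedError()
-- ===== SOURCE B (Python) =====
-- def _lcs_len(a: str, b: str) -> int:
--     # bottom-up LCS length with a rolling row: O(len(a)*len(b))
--     prev = [0] * (len(b) + 1)
--     for ca in a:
--         cur = [0]
--         for j, cb in enumerate(b, 1):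
--             cur.append(prev[j - 1] + 1 if ca == cb else max(prev[j], cur[j - 1]))
--         prev = cur
--     return prev[-1]
--
-- def closest_word(word: str, possibilities: list[str]):
--     return max(possibilities, key=lambda cand: _lcs_len(word, cand), default="")
-- ===== Notes on version B (the rewrite author's own statement) =====
-- stated objective: faster
-- what changed: Replaces the exponential memo-free recursive LCS with a bottom-up rolling-row DP table per candidate, and picks the first maximum with max(..., key=..., default='') instead of a sentinel accumulator loop.
import Mathlib
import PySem

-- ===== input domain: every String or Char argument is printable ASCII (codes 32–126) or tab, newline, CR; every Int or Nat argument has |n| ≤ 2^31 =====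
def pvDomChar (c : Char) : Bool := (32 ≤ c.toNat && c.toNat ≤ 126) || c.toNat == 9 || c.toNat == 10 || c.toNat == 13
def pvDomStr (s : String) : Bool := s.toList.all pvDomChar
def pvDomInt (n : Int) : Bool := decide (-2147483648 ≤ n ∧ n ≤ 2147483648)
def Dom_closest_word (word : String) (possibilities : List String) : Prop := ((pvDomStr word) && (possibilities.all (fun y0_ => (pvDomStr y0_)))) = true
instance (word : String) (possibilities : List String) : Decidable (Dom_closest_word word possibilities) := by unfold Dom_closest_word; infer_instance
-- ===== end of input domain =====

-- B replaces A's exponential memo-free recursive LCS by a bottom-up rolling-row DP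
-- per candidate and selects the first maximum idiomatically (asymptotically faster).


-- ===== PORT A =====
-- Python's lcs is only ever called with x ≤ len(first), y ≤ len(second) (and recursion
-- preserves that), so the in-range indexing first_string[x-1] is ported exactly by getD.
def lcsA (s t : List Char) (x y : Nat) : Nat :=
  if x = 0 ∨ y = 0 then 0
  else if s.getD (x - 1) ' ' == t.getD (y - 1) ' ' then
    1 + lcsA s t (x - 1) (y - 1)
  else
    max (lcsA s t x (y - 1)) (lcsA s t (x - 1) y)
termination_by x + y
decreasing_by all_goals omega

def closest_word (word : String) (possibilities : List String) : String :=
  (possibilities.foldl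
    (fun (st : String × Int) closest =>
      let temp : Nat := lcsA word.toList closest.toList word.toList.length closest.toList.length
      if (temp : Int) > st.2 then (closest, (temp : Int)) else st)
    ("", -1)).1

-- ===== PORT B =====
-- inner loop of _lcs_len: builds the rest of the new row from the previous row's
-- consecutive entries, the remaining chars of b, and the last value appended to cur
def nextRow (c : Char) : List Nat → List Char → Nat → List Nat
  | p0 :: p1 :: ps, cb :: bs, last =>
    let v := if c == cb then p0 + 1 else max p1 last
    v :: nextRow c (p1 :: ps) bs v
  | _, _, _ => []

def lcsB (a b : List Char) : Nat :=
  (a.foldl (fun prev ca => 0 :: nextRow ca prev b 0) (List.replicate (b.length + 1) 0)).getLastD 0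

def closest_word_alt (word : String) (possibilities : List String) : String :=
  match possibilities with
  | [] => ""
  | h :: t =>
    (t.foldl
      (fun (acc : Nat × String) x =>
        let k := lcsB word.toList x.toList
        if k > acc.1 then (k, x) else acc)
      (lcsB word.toList h.toList, h)).2

-- ===== PRECONDITION & SPEC =====
def Spec_closest_word (word : String) (possibilities : List String) (out : String) : Prop := out = closest_word_alt word possibilities
instance (word : String) (possibilities : List String) (out : String) : Decidable (Spec_closest_word word possibilities out) := by unfold Spec_closest_word; infer_instance

-- ===== CLAIM (what is proved, stated in full; the proofs are below) =====
def Claim_equal_closest_word : Prop := ∀ (word : String) (possibilities : List String), Dom_closest_word word possibilities → Spec_closest_word word possibilities (closest_word word possibilities)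

-- ===== LEMMAS AND PROOFS =====

lemma lcsA_zero_left (s t : List Char) (y : Nat) : lcsA s t 0 y = 0 := by
  rw [lcsA]; simp

lemma lcsA_zero_right (s t : List Char) (x : Nat) : lcsA s t x 0 = 0 := by
  rw [lcsA]; simp

-- the inner loop computes the new DP row entries lcsA a b (i+1) (k+1), …, lcsA a b (i+1) m
lemma nextRow_spec (a b : List Char) (i : Nat) :
    ∀ n k, k + n = b.length →
      nextRow (a.getD i ' ')
          ((List.range' k (n + 1)).map (fun j => lcsA a b i j))
          (b.drop k) (lcsA a b (i + 1) k)
        = (List.range' (k + 1) n).map (fun j => lcsA a b (i + 1) j) := by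
  intro n
  induction n with
  | zero =>
    intro k hk
    have h1 : b.drop k = [] := List.drop_eq_nil_of_le (by omega)
    rw [h1]
    rfl
  | succ m ih =>
    intro k hk
    have hklt : k < b.length := by omega
    have hgk : b.getD k ' ' = b[k] := by
      rw [List.getD_eq_getElem?_getD, List.getElem?_eq_getElem hklt]; rfl
    have hdrop : b.drop k = b.getD k ' ' :: b.drop (k + 1) := by
      rw [hgk]; exact List.drop_eq_getElem_cons hklt
    have hr : List.range' k (m + 1 + 1) = k :: List.range' (k + 1) (m + 1) := by
      simp [List.range'_succ]
    have hr2 : List.range' (k + 1) (m + 1) = (k + 1) :: List.range' (k + 2) m := by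
      simp [List.range'_succ]
    rw [hr, hdrop]
    simp only [List.map_cons, hr2]
    rw [nextRow]
    have hv : (if a.getD i ' ' == b.getD k ' ' then lcsA a b i k + 1
        else max (lcsA a b i (k + 1)) (lcsA a b (i + 1) k)) = lcsA a b (i + 1) (k + 1) := by
      conv_rhs => rw [lcsA]
      simp only [Nat.add_sub_cancel]
      have : ¬ (i + 1 = 0 ∨ k + 1 = 0) := by omega
      rw [if_neg this]
      split_ifs with h
      · omega
      · exact Nat.max_comm _ _
    rw [hv]
    have := ih (k + 1) (by omega)
    rw [hr2] at this
    simp only [List.map_cons] at this ⊢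
    rw [this]

-- after folding over a.take i, the row holds lcsA a b i j for j = 0 … b.length
lemma row_spec (a b : List Char) :
    ∀ i, i ≤ a.length →
      (a.take i).foldl (fun prev ca => 0 :: nextRow ca prev b 0)
          (List.replicate (b.length + 1) 0)
        = (List.range' 0 (b.length + 1)).map (fun j => lcsA a b i j) := by
  intro i
  induction i with
  | zero =>
    intro _
    simp [List.take_zero]
    apply List.ext_getElem
    · simp
    · intro j h1 h2
      simp [lcsA_zero_left]
  | succ m ih =>
    intro hle
    have hm : m < a.length := by omega
    have hg : a.getD m ' ' = a[m] := by
      rw [List.getD_eq_getElem?_getD, List.getElem?_eq_getElem hm]; rfl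
    have htake : a.take (m + 1) = a.take m ++ [a.getD m ' '] := by
      rw [List.take_add_one, List.getElem?_eq_getElem hm, hg]; rfl
    rw [htake, List.foldl_append, ih (by omega)]
    simp only [List.foldl_cons, List.foldl_nil]
    have h0 : lcsA a b (m + 1) 0 = 0 := lcsA_zero_right a b (m + 1)
    have := nextRow_spec a b m b.length 0 (by omega)
    rw [h0] at this
    simp only [List.drop_zero, Nat.zero_add] at this
    rw [this]
    have hr : List.range' 0 (b.length + 1) = 0 :: List.range' 1 b.length := by
      simp [List.range'_succ]
    rw [hr]
    simp [h0]

lemma lcsB_eq_lcsA (a b : List Char) : lcsB a b = lcsA a b a.length b.length := by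
  unfold lcsB
  have := row_spec a b a.length (le_refl _)
  rw [List.take_length] at this
  rw [this]
  have hr : List.range' 0 (b.length + 1) = List.range' 0 b.length ++ [b.length] := by
    simpa using List.range'_concat (s := 0) (n := b.length) (step := 1)
  rw [hr, List.map_append]
  simp

-- the two selection folds agree once the keys agree: A carries (word, length as Int)
-- starting from the sentinel -1, B carries (length as Nat, word) starting from the head
lemma fold_agree (word : String) (t : List String) :
    ∀ (w : String) (n : Nat),
      (t.foldl
        (fun (st : String × Int) closest =>
          let temp : Nat := lcsA word.toList closest.toList word.toList.length closest.toList.length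
          if (temp : Int) > st.2 then (closest, (temp : Int)) else st)
        (w, (n : Int))).1
      = (t.foldl
          (fun (acc : Nat × String) x =>
            let k := lcsB word.toList x.toList
            if k > acc.1 then (k, x) else acc)
          (n, w)).2 := by
  induction t with
  | nil => intro w n; rfl
  | cons h t ih =>
    intro w n
    simp only [List.foldl_cons]
    rw [lcsB_eq_lcsA]
    by_cases hgt :
        lcsA word.toList h.toList word.toList.length h.toList.length > n
    · rw [if_pos (by exact_mod_cast hgt), if_pos hgt]; exact ih h _
    · rw [if_neg (by exact_mod_cast hgt), if_neg hgt]; exact ih w n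

-- ===== VERDICT (by name: the statement is the Claim_ definition above) =====
theorem closest_word_spec : Claim_equal_closest_word := by
  intro word possibilities _
  unfold Spec_closest_word closest_word closest_word_alt
  cases possibilities with
  | nil => rfl
  | cons h t =>
    simp only [List.foldl_cons]
    rw [lcsB_eq_lcsA]
    have hfirst : ((lcsA word.toList h.toList word.toList.length h.toList.length : Nat) : Int) > (-1 : Int) := by
      omega
    rw [if_pos hfirst]
    exact fold_agree word t h _
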